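-- pv_equiv track=rewrite | github.com/jhyun42/algo-gym | baekjun/ss_sw_test/magician_shark_and_blizzard/solution.py | explode_cells
-- ===== SOURCE A (Python) =====
-- def explode_cells(flat_list):
--     point = 0
--     curr_repeat_cnt = 1
--     for idx in range(1, len(flat_list)):
--
--         # 연속이 됨
--         if flat_list[idx - 1] == flat_list[idx]:
--             curr_repeat_cnt += 1
--
--         else:
--             if curr_repeat_cnt >= 4:
--                 for repeat_idx in range(1, curr_repeat_cnt + 1):
--                     # 1이면 1점 2면 2점 3이면 3점
--                     point += flat_list[idx - repeat_idx]
--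
--                     # 터뜨렸으면 0으로 바꿈
--                     flat_list[idx - repeat_idx] = 0
--
--             curr_repeat_cnt = 1
--
--     # 진짜 악날하게 처음부터 끝까지 다 반복하는 edge case
--     if curr_repeat_cnt >= 4:
--         for repeat_idx in range(1, curr_repeat_cnt + 1):
--             point += flat_list[len(flat_list) - repeat_idx]
--             flat_list[len(flat_list) - repeat_idx] = 0
--
--     return point
-- ===== SOURCE B (Python) =====
-- def explode_cells(flat_list):
--     n = len(flat_list)
--     point = 0
--     for i in range(n):
--         if any(0 <= k and k + 3 < n
--                and flat_list[k] == flat_list[k + 1] == flat_list[k + 2] == flat_list[k + 3]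
--                for k in range(i - 3, i + 1)):
--             point += flat_list[i]
--     return point
-- ===== Notes on version B (the rewrite author's own statement) =====
-- stated objective: alternative
-- what changed: B replaces A's stateful run-length counter (with a backward sum/zero inner loop and a duplicated end-of-list branch) by a stateless per-index criterion: index i contributes its value iff some window of 4 consecutive equal values contains i; no run counting, no mutation (equivalence is about the return value only, A zeroes exploded runs in place).
import Mathlib
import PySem

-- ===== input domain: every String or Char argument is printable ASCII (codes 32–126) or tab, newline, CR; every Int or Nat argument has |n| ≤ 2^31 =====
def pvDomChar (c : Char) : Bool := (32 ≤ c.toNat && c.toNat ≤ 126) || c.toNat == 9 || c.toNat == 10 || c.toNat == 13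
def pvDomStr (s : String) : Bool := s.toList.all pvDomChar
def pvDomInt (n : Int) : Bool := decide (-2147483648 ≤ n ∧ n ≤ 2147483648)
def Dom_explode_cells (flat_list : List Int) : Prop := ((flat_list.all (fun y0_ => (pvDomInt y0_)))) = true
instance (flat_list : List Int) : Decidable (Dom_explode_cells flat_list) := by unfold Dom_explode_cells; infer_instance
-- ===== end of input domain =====

-- B replaces A's stateful run-length counter (backward sum/zero inner loop plus a duplicated
-- end-of-list branch) by a stateless per-index criterion: index i contributes its value iff some
-- window of 4 consecutive equal values contains i. A mutates flat_list in place (zeroes exploded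
-- runs), B does not: the equivalence proved here is about the RETURN value only.

-- ===== PORT A =====
-- the inner 'for repeat_idx in range(1, curr_repeat_cnt + 1)' explosion loop body of A
def aInner (idx : Int) (pl : Int × List Int) (r : Int) : Int × List Int :=
  (pl.1 + PySem.List.pyGetD pl.2 (idx - r) 0, PySem.List.pySetD pl.2 (idx - r) 0)

-- the body of A's 'for idx in range(1, len(flat_list))' loop; state = (point, curr_repeat_cnt, flat_list)
def aStep (st : Int × Int × List Int) (idx : Int) : Int × Int × List Int :=
  if PySem.List.pyGetD st.2.2 (idx - 1) 0 = PySem.List.pyGetD st.2.2 idx 0 then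
    (st.1, st.2.1 + 1, st.2.2)
  else if st.2.1 ≥ 4 then
    let pl := (PySem.List.pyRange 1 (st.2.1 + 1) 1).foldl (aInner idx) (st.1, st.2.2)
    (pl.1, 1, pl.2)
  else (st.1, 1, st.2.2)

def explode_cells (flat_list : List Int) : Int :=
  let n : Int := flat_list.length
  let st := (PySem.List.pyRange 1 n 1).foldl aStep (0, 1, flat_list)
  if st.2.1 ≥ 4 then
    ((PySem.List.pyRange 1 (st.2.1 + 1) 1).foldl (aInner n) (st.1, st.2.2)).1
  else st.1

-- ===== PORT B =====
-- B's per-index test: 'any(0 <= k and k + 3 < n and l[k] == l[k+1] == l[k+2] == l[k+3] for k in range(i-3, i+1))'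
-- (the 'and' guards short-circuit before indexing, so the in-range reads are exact; pyGetD's default is never used)
def bOk (l : List Int) (n i : Int) : Bool :=
  (PySem.List.pyRange (i - 3) (i + 1) 1).any fun k =>
    decide (0 ≤ k) && decide (k + 3 < n) &&
    (PySem.List.pyGetD l k 0 == PySem.List.pyGetD l (k + 1) 0) &&
    (PySem.List.pyGetD l (k + 1) 0 == PySem.List.pyGetD l (k + 2) 0) &&
    (PySem.List.pyGetD l (k + 2) 0 == PySem.List.pyGetD l (k + 3) 0)

def explode_cells_alt (flat_list : List Int) : Int :=
  let n : Int := flat_list.length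
  (PySem.List.pyRange 0 n 1).foldl
    (fun point i =>
      if bOk flat_list n i then point + PySem.List.pyGetD flat_list i 0 else point) 0

-- ===== PRECONDITION & SPEC =====
def Spec_explode_cells (flat_list : List Int) (out : Int) : Prop := out = explode_cells_alt flat_list
instance (flat_list : List Int) (out : Int) : Decidable (Spec_explode_cells flat_list out) := by unfold Spec_explode_cells; infer_instance

-- ===== CLAIM (what is proved, stated in full; the proofs are below) =====
def Claim_equal_explode_cells : Prop := ∀ (flat_list : List Int), Dom_explode_cells flat_list → Spec_explode_cells flat_list (explode_cells flat_list)

-- ===== LEMMAS AND PROOFS =====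

-- reference scan: (current run value v, its count c so far, accumulated point p)
def gA : List Int → Int → Int → Int → Int
  | [], v, c, p => if c ≥ 4 then p + c * v else p
  | x :: xs, v, c, p =>
      if v = x then gA xs v (c + 1) p else gA xs x 1 (if c ≥ 4 then p + c * v else p)

def g0 : List Int → Int
  | [] => 0
  | x :: xs => gA xs x 1 0

-- length of the leading constant-v prefix
def leadCount (v : Int) : List Int → Nat
  | [] => 0
  | x :: xs => if x = v then leadCount v xs + 1 else 0

theorem leadCount_le (v : Int) (xs : List Int) : leadCount v xs ≤ xs.length := by
  induction xs with
  | nil => simp [leadCount]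
  | cons x xs ih => unfold leadCount; split <;> simp <;> omega

theorem gA_add (xs : List Int) (v c a b : Int) : gA xs v c (a + b) = a + gA xs v c b := by
  induction xs generalizing v c b with
  | nil => simp only [gA]; split <;> ring
  | cons x xs ih =>
    simp only [gA]
    split
    · exact ih v (c + 1) b
    · split
      · rw [show a + b + c * v = a + (b + c * v) by ring]; exact ih x 1 _
      · exact ih x 1 b

theorem gA_runs (xs : List Int) (v c p : Int) :
    gA xs v c p =
      (if c + (leadCount v xs : Int) ≥ 4 then p + (c + (leadCount v xs : Int)) * v else p)
        + g0 (xs.drop (leadCount v xs)) := by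
  induction xs generalizing c p with
  | nil => simp [gA, leadCount, g0]
  | cons x xs ih =>
    by_cases hx : x = v
    · subst hx
      simp only [gA, leadCount, eq_self_iff_true, if_true]
      rw [ih (c + 1) p, List.drop_succ_cons]
      congr 1
      push_cast
      split_ifs with h1 h2 <;> first | (exfalso; omega) | ring
    · simp only [gA, leadCount, if_neg hx, if_neg (Ne.symm hx)]
      rw [show ((0 : Nat) : Int) = 0 by norm_num, List.drop_zero]
      have : g0 (x :: xs) = gA xs x 1 0 := rfl
      rw [this, ← gA_add xs x 1 (if c + 0 ≥ 4 then p + (c + 0) * v else p) 0]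
      congr 1
      split_ifs with h1 h2 <;> first | (exfalso; omega) | ring

-- ===== A side =====
-- the tail of A's computation starting at loop index i with state (p, c, lst)
def auxA (l lst : List Int) (p c : Int) (i : Int) : Int :=
  if ((PySem.List.pyRange i (l.length : Int) 1).foldl aStep (p, c, lst)).2.1 ≥ 4 then
    ((PySem.List.pyRange 1 (((PySem.List.pyRange i (l.length : Int) 1).foldl aStep (p, c, lst)).2.1 + 1) 1).foldl
        (aInner (l.length : Int))
        (((PySem.List.pyRange i (l.length : Int) 1).foldl aStep (p, c, lst)).1,
         ((PySem.List.pyRange i (l.length : Int) 1).foldl aStep (p, c, lst)).2.2)).1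
  else ((PySem.List.pyRange i (l.length : Int) 1).foldl aStep (p, c, lst)).1

theorem auxA_step (l lst : List Int) (p c : Int) (i : Int) (h : i < (l.length : Int)) :
    auxA l lst p c i
      = auxA l (aStep (p, c, lst) i).2.2 (aStep (p, c, lst) i).1 (aStep (p, c, lst) i).2.1 (i + 1) := by
  unfold auxA
  rw [PySem.List.pyRange_one_cons h, List.foldl_cons]

-- A's inner explosion loop: sums c copies of w and zeroes positions idx-c..idx-1
theorem inner_eq (w : Int) :
    ∀ (c idx : Nat) (p : Int) (lst : List Int), c ≤ idx → idx ≤ lst.length →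
      (∀ j : Nat, idx - c ≤ j → j < idx → lst.getD j 0 = w) →
      ((PySem.List.pyRange 1 ((c : Int) + 1) 1).foldl (aInner (idx : Int)) (p, lst)).1
          = p + (c : Int) * w
        ∧ ((PySem.List.pyRange 1 ((c : Int) + 1) 1).foldl (aInner (idx : Int)) (p, lst)).2.length
          = lst.length
        ∧ ∀ j : Nat,
            ((PySem.List.pyRange 1 ((c : Int) + 1) 1).foldl (aInner (idx : Int)) (p, lst)).2.getD j 0
              = if idx - c ≤ j ∧ j < idx then 0 else lst.getD j 0 := by
  intro c
  induction c with
  | zero =>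
    intro idx p lst _ _ _
    rw [show ((0 : Nat) : Int) + 1 = 1 by norm_num, PySem.List.pyRange_one_eq_nil (by omega)]
    refine ⟨by simp, rfl, ?_⟩
    intro j
    rw [if_neg (by omega)]
    rfl
  | succ c ih =>
    intro idx p lst hc hlen hread
    obtain ⟨ih1, ih2, ih3⟩ := ih idx p lst (by omega) hlen (fun j hj1 hj2 => hread j (by omega) hj2)
    rw [show (((c + 1 : Nat)) : Int) + 1 = ((c : Int) + 1) + 1 by push_cast; ring,
        PySem.List.pyRange_one_succ_right (by omega), List.foldl_append, List.foldl_cons,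
        List.foldl_nil]
    set res := (PySem.List.pyRange 1 ((c : Int) + 1) 1).foldl (aInner (idx : Int)) (p, lst) with hres
    have hpos : (idx : Int) - ((c : Int) + 1) = ((idx - (c + 1) : Nat) : Int) := by push_cast; omega
    have hkl : idx - (c + 1) < lst.length := by omega
    have hread1 : res.2.getD (idx - (c + 1)) 0 = w := by
      rw [ih3, if_neg (by omega)]
      exact hread (idx - (c + 1)) (by omega) (by omega)
    constructor
    · show res.1 + PySem.List.pyGetD res.2 ((idx : Int) - ((c : Int) + 1)) 0 = _
      rw [hpos, PySem.List.pyGetD_natCast, hread1, ih1]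
      push_cast
      ring
    constructor
    · show (PySem.List.pySetD res.2 ((idx : Int) - ((c : Int) + 1)) 0).length = _
      rw [hpos, PySem.List.pySetD_natCast, List.length_set, ih2]
    · intro j
      show (PySem.List.pySetD res.2 ((idx : Int) - ((c : Int) + 1)) 0).getD j 0 = _
      rw [hpos, PySem.List.pySetD_natCast]
      by_cases hj : j = idx - (c + 1)
      · subst hj
        rw [if_pos (by omega)]
        have : (res.2.set (idx - (c + 1)) 0)[idx - (c + 1)]? = some 0 :=
          List.getElem?_set_self (by rw [ih2]; omega)
        simp [List.getD, this]
      · have : (res.2.set (idx - (c + 1)) 0)[j]? = res.2[j]? :=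
          List.getElem?_set_ne (fun h => hj h.symm)
        rw [List.getD, this, ← List.getD, ih3]
        by_cases hcase : idx - (c + 1) ≤ j ∧ j < idx
        · rw [if_pos hcase, if_pos (by omega)]
        · rw [if_neg hcase, if_neg (by omega)]

theorem auxA_final (l lst : List Int) (p c v : Int) (hc1 : 1 ≤ c) (hcl : c ≤ (l.length : Int))
    (hlen : lst.length = l.length)
    (hagree : ∀ j : Nat, (l.length : Int) - c ≤ (j : Int) → j < l.length → lst.getD j 0 = l.getD j 0)
    (hrun : ∀ j : Nat, (l.length : Int) - c ≤ (j : Int) → j < l.length → l.getD j 0 = v) :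
    auxA l lst p c (l.length : Int) = p + gA (l.drop l.length) v c 0 := by
  unfold auxA
  rw [PySem.List.pyRange_one_eq_nil (by omega), List.foldl_nil, List.drop_length]
  by_cases h4 : (c ≥ 4)
  · rw [if_pos h4]
    have hcn : ((c.toNat : Nat) : Int) = c := Int.toNat_of_nonneg (by omega)
    obtain ⟨e1, -, -⟩ := inner_eq v c.toNat l.length p lst (by omega) (by omega)
      (fun j hj1 hj2 => by
        rw [hagree j (by omega) hj2]
        exact hrun j (by omega) hj2)
    rw [show (c + 1 : Int) = ((c.toNat : Nat) : Int) + 1 by rw [hcn]] at *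
    rw [e1, hcn]
    simp only [gA, if_pos h4]
    ring
  · rw [if_neg h4]
    simp only [gA, if_neg h4]
    ring

theorem auxA_eq (l : List Int) :
    ∀ (k i : Nat) (c p v : Int) (lst : List Int),
      l.length - i ≤ k → i ≤ l.length → 1 ≤ c → c ≤ (i : Int) →
      lst.length = l.length →
      (∀ j : Nat, (i : Int) - c ≤ (j : Int) → j < l.length → lst.getD j 0 = l.getD j 0) →
      (∀ j : Nat, (i : Int) - c ≤ (j : Int) → j < i → l.getD j 0 = v) →
      auxA l lst p c (i : Int) = p + gA (l.drop i) v c 0 := by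
  intro k
  induction k with
  | zero =>
    intro i c p v lst hk hi hc1 hci hlen hagree hrun
    have hieq : i = l.length := by omega
    subst hieq
    exact auxA_final l lst p c v hc1 hci hlen hagree hrun
  | succ k ih =>
    intro i c p v lst hk hi hc1 hci hlen hagree hrun
    by_cases hlt : i < l.length
    case neg =>
      have hieq : i = l.length := by omega
      subst hieq
      exact auxA_final l lst p c v hc1 hci hlen hagree hrun
    case pos =>
      have hlti : ((i : Int) < (l.length : Int)) := by exact_mod_cast hlt
      have hi1 : 1 ≤ i := by omega
      rw [auxA_step l lst p c (i : Int) hlti]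
      have hm1 : (i : Int) - 1 = ((i - 1 : Nat) : Int) := by push_cast; omega
      have hvm1 : lst.getD (i - 1) 0 = v := by
        rw [hagree (i - 1) (by push_cast; omega) (by omega)]
        exact hrun (i - 1) (by push_cast; omega) (by omega)
      have hxi : lst.getD i 0 = l.getD i 0 := hagree i (by push_cast; omega) hlt
      have hgi : l.getD i 0 = l[i] := List.getD_eq_getElem l 0 hlt
      have hdrop : l.drop i = l[i] :: l.drop (i + 1) := List.drop_eq_getElem_cons hlt
      have hcond : (PySem.List.pyGetD lst ((i : Int) - 1) 0 = PySem.List.pyGetD lst (i : Int) 0)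
          ↔ (v = l[i]) := by
        rw [hm1, PySem.List.pyGetD_natCast, PySem.List.pyGetD_natCast, hvm1, hxi, hgi]
      have hcast1 : ((i : Int) + 1) = ((i + 1 : Nat) : Int) := by push_cast; ring
      by_cases hvx : v = l[i]
      · -- run continues
        have hstep : aStep (p, c, lst) (i : Int) = (p, c + 1, lst) := by
          unfold aStep
          rw [if_pos (hcond.mpr hvx)]
        rw [hstep, hcast1]
        rw [ih (i + 1) (c + 1) p v lst (by omega) (by omega) (by omega) (by push_cast; omega)
          hlen
          (fun j hj1 hj2 => hagree j (by push_cast at hj1 ⊢; omega) hj2)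
          (fun j hj1 hj2 => by
            rcases Nat.lt_or_ge j i with hji | hji
            · exact hrun j (by push_cast at hj1 ⊢; omega) hji
            · have : j = i := by omega
              subst this
              rw [hgi]; exact hvx.symm)]
        rw [hdrop]
        simp only [gA, if_pos hvx]
      · -- run breaks at i
        have hnc : ¬ (PySem.List.pyGetD lst ((i : Int) - 1) 0 = PySem.List.pyGetD lst (i : Int) 0) :=
          fun h => hvx (hcond.mp h)
        by_cases h4 : (c ≥ 4)
        · -- explode the finished run
          have hcn : ((c.toNat : Nat) : Int) = c := Int.toNat_of_nonneg (by omega)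
          obtain ⟨e1, e2, e3⟩ := inner_eq v c.toNat i p lst (by omega) (by omega)
            (fun j hj1 hj2 => by
              rw [hagree j (by push_cast; omega) (by omega)]
              exact hrun j (by push_cast; omega) hj2)
          set pl := (PySem.List.pyRange 1 (c + 1) 1).foldl (aInner (i : Int)) (p, lst) with hpl
          have hplc : pl = (PySem.List.pyRange 1 (((c.toNat : Nat) : Int) + 1) 1).foldl
              (aInner (i : Int)) (p, lst) := by rw [hcn]
          have hstep : aStep (p, c, lst) (i : Int) = (pl.1, 1, pl.2) := by
            unfold aStep
            rw [if_neg hnc, if_pos h4]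
          rw [hstep, hcast1]
          have hpl1 : pl.1 = p + c * v := by rw [hplc, e1, hcn]
          have hpl2len : pl.2.length = l.length := by rw [hplc, e2, hlen]
          rw [ih (i + 1) 1 pl.1 l[i] pl.2 (by omega) (by omega) (by omega) (by push_cast; omega)
            hpl2len
            (fun j hj1 hj2 => by
              have hji : i ≤ j := by push_cast at hj1; omega
              rw [hplc, e3 j, if_neg (by omega)]
              exact hagree j (by push_cast; omega) hj2)
            (fun j hj1 hj2 => by
              have : j = i := by push_cast at hj1; omega
              subst this
              exact hgi)]
          rw [hpl1, hdrop]
          simp only [gA, if_neg hvx, if_pos h4]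
          rw [show (0 : Int) + c * v = c * v + 0 by ring, gA_add]
          ring
        · -- run too short: just reset
          have hstep : aStep (p, c, lst) (i : Int) = (p, 1, lst) := by
            unfold aStep
            rw [if_neg hnc, if_neg h4]
          rw [hstep, hcast1]
          rw [ih (i + 1) 1 p l[i] lst (by omega) (by omega) (by omega) (by push_cast; omega)
            hlen
            (fun j hj1 hj2 => hagree j (by push_cast at hj1 ⊢; omega) hj2)
            (fun j hj1 hj2 => by
              have : j = i := by push_cast at hj1; omega
              subst this
              exact hgi)]
          rw [hdrop]
          simp only [gA, if_neg hvx, if_neg h4]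

theorem explode_cells_eq_g0 (l : List Int) : explode_cells l = g0 l := by
  cases l with
  | nil => decide
  | cons a t =>
    have h1 : explode_cells (a :: t) = auxA (a :: t) (a :: t) 0 1 1 := rfl
    have hk : (a :: t).length - 1 ≤ (a :: t).length := by omega
    have hi : 1 ≤ (a :: t).length := by simp
    have hc1 : (1 : Int) ≤ ((1 : Nat) : Int) := by simp
    have hci : ((1 : Nat) : Int) ≤ ((1 : Nat) : Int) := le_refl _
    have hagree : ∀ j : Nat, ((1 : Nat) : Int) - ((1 : Nat) : Int) ≤ (j : Int) →
        j < (a :: t).length → (a :: t).getD j 0 = (a :: t).getD j 0 := fun _ _ _ => rfl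
    have hrun : ∀ j : Nat, ((1 : Nat) : Int) - ((1 : Nat) : Int) ≤ (j : Int) → j < 1 →
        (a :: t).getD j 0 = a := by
      intro j _ hj2
      have hj0 : j = 0 := by omega
      subst hj0
      rfl
    have h2 := auxA_eq (a :: t) (a :: t).length 1 ((1 : Nat) : Int) 0 a (a :: t) hk hi hc1 hci
      rfl hagree hrun
    rw [h1, show (1 : Int) = ((1 : Nat) : Int) by norm_num, h2]
    simp [g0]

-- ===== B side =====
-- spec form of bOk: i lies in some all-equal window of 4
def OkP (l : List Int) (i : Nat) : Prop :=
  ∃ k : Nat, k ≤ i ∧ i ≤ k + 3 ∧ k + 3 < l.length ∧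
    l.getD k 0 = l.getD (k + 1) 0 ∧ l.getD (k + 1) 0 = l.getD (k + 2) 0 ∧
    l.getD (k + 2) 0 = l.getD (k + 3) 0

-- Nat-indexed mirror of bOk
def okSpec (l : List Int) (i : Nat) : Bool :=
  (List.range l.length).any fun k =>
    decide (k ≤ i ∧ i ≤ k + 3 ∧ k + 3 < l.length ∧
      l.getD k 0 = l.getD (k + 1) 0 ∧ l.getD (k + 1) 0 = l.getD (k + 2) 0 ∧
      l.getD (k + 2) 0 = l.getD (k + 3) 0)

def SN (l : List Int) : Int :=
  ((List.range l.length).map (fun i => if okSpec l i then l.getD i 0 else 0)).sum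

theorem okSpec_iff (l : List Int) (i : Nat) : okSpec l i = true ↔ OkP l i := by
  unfold okSpec OkP
  rw [List.any_eq_true]
  constructor
  · rintro ⟨k, _, hd⟩
    rw [decide_eq_true_eq] at hd
    exact ⟨k, hd⟩
  · rintro ⟨k, h⟩
    exact ⟨k, List.mem_range.mpr (by omega), decide_eq_true h⟩

theorem bOk_natCast (l : List Int) (i : Nat) :
    bOk l (l.length : Int) ((i : Nat) : Int) = okSpec l i := by
  rw [Bool.eq_iff_iff, okSpec_iff]
  unfold bOk
  rw [List.any_eq_true]
  constructor
  · rintro ⟨k, hmem, hd⟩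
    rw [PySem.List.mem_pyRange_one] at hmem
    simp only [Bool.and_eq_true, decide_eq_true_eq, beq_iff_eq] at hd
    obtain ⟨⟨⟨⟨hk0, hkn⟩, e1⟩, e2⟩, e3⟩ := hd
    have hkk : k = ((k.toNat : Nat) : Int) := (Int.toNat_of_nonneg hk0).symm
    rw [hkk] at e1 e2 e3
    simp only [show ((k.toNat : Nat) : Int) + 1 = ((k.toNat + 1 : Nat) : Int) by push_cast; ring,
        show ((k.toNat : Nat) : Int) + 2 = ((k.toNat + 2 : Nat) : Int) by push_cast; ring,
        show ((k.toNat : Nat) : Int) + 3 = ((k.toNat + 3 : Nat) : Int) by push_cast; ring]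
      at e1 e2 e3
    simp only [PySem.List.pyGetD_natCast] at e1 e2 e3
    exact ⟨k.toNat, by omega, by omega, by omega, e1, e2, e3⟩
  · rintro ⟨k, h1, h2, h3, e1, e2, e3⟩
    refine ⟨(k : Int), PySem.List.mem_pyRange_one.mpr ⟨by omega, by omega⟩, ?_⟩
    simp only [Bool.and_eq_true, decide_eq_true_eq, beq_iff_eq]
    rw [show ((k : Nat) : Int) + 1 = ((k + 1 : Nat) : Int) by push_cast; ring,
        show ((k : Nat) : Int) + 2 = ((k + 2 : Nat) : Int) by push_cast; ring,
        show ((k : Nat) : Int) + 3 = ((k + 3 : Nat) : Int) by push_cast; ring]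
    simp only [PySem.List.pyGetD_natCast]
    exact ⟨⟨⟨⟨by omega, by omega⟩, e1⟩, e2⟩, e3⟩

theorem explode_cells_alt_eq_SN (l : List Int) : explode_cells_alt l = SN l := by
  show (PySem.List.pyRange 0 (l.length : Int) 1).foldl
      (fun point i =>
        if bOk l (l.length : Int) i then point + PySem.List.pyGetD l i 0 else point) 0 = SN l
  rw [PySem.List.pyRange_zero_nat, List.foldl_map]
  have hbody : (fun (p : Int) (i : Nat) =>
        if bOk l (l.length : Int) ((i : Nat) : Int) then p + PySem.List.pyGetD l ((i : Nat) : Int) 0 else p)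
      = (fun p i => p + (if okSpec l i then l.getD i 0 else 0)) := by
    funext p i
    rw [bOk_natCast, PySem.List.pyGetD_natCast]
    by_cases h : okSpec l i = true
    · simp [h]
    · simp [h]
  rw [hbody, PySem.List.foldl_add, zero_add]
  rfl

-- a 4-window of equal values cannot straddle the end of the leading run
theorem window_no_cross (l : List Int) (x : Int) (c k : Nat)
    (hpre : ∀ j, j < c → l.getD j 0 = x)
    (hbr : c < l.length → l.getD c 0 ≠ x)
    (hk1 : k < c) (hk2 : c ≤ k + 3) (hk3 : k + 3 < l.length)
    (h1 : l.getD k 0 = l.getD (k + 1) 0) (h2 : l.getD (k + 1) 0 = l.getD (k + 2) 0)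
    (h3 : l.getD (k + 2) 0 = l.getD (k + 3) 0) : False := by
  have hcx : l.getD c 0 ≠ x := hbr (by omega)
  have : c = k + 1 ∨ c = k + 2 ∨ c = k + 3 := by omega
  rcases this with h | h | h
  · apply hcx; rw [h, ← h1]; exact hpre k (by omega)
  · apply hcx; rw [h, ← h2]; exact hpre (k + 1) (by omega)
  · apply hcx; rw [h, ← h3]; exact hpre (k + 2) (by omega)

-- inside the leading run of length c, membership in a 4-window is exactly 4 ≤ c
theorem OkP_of_run (l : List Int) (x : Int) (c : Nat)
    (hpre : ∀ j, j < c → l.getD j 0 = x)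
    (hbr : c < l.length → l.getD c 0 ≠ x)
    (hcl : c ≤ l.length) (i : Nat) (hi : i < c) : OkP l i ↔ 4 ≤ c := by
  constructor
  · rintro ⟨k, h1, h2, h3, e1, e2, e3⟩
    have hk3 : k + 3 < c := by
      by_contra hge
      exact window_no_cross l x c k hpre hbr (by omega) (by omega) h3 e1 e2 e3
    omega
  · intro h4
    refine ⟨min i (c - 4), by omega, by omega, by omega, ?_, ?_, ?_⟩ <;>
      rw [hpre _ (by omega), hpre _ (by omega)]

theorem getD_drop' (l : List Int) (c j : Nat) :
    (l.drop c).getD j 0 = l.getD (c + j) 0 := by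
  simp [List.getD_eq_getElem?_getD, List.getElem?_drop]

-- past the leading run, the window predicate shifts onto the dropped list
theorem OkP_shift (l : List Int) (x : Int) (c : Nat)
    (hpre : ∀ j, j < c → l.getD j 0 = x)
    (hbr : c < l.length → l.getD c 0 ≠ x) (j : Nat) :
    OkP l (c + j) ↔ OkP (l.drop c) j := by
  constructor
  · rintro ⟨k, h1, h2, h3, e1, e2, e3⟩
    have hck : c ≤ k := by
      by_contra hlt
      exact window_no_cross l x c k hpre hbr (by omega) (by omega) h3 e1 e2 e3
    refine ⟨k - c, by omega, by omega, by rw [List.length_drop]; omega, ?_, ?_, ?_⟩ <;>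
      rw [getD_drop', getD_drop']
    · rw [show c + (k - c) = k by omega, show c + (k - c + 1) = k + 1 by omega]; exact e1
    · rw [show c + (k - c + 1) = k + 1 by omega, show c + (k - c + 2) = k + 2 by omega]; exact e2
    · rw [show c + (k - c + 2) = k + 2 by omega, show c + (k - c + 3) = k + 3 by omega]; exact e3
  · rintro ⟨k, h1, h2, h3, e1, e2, e3⟩
    rw [List.length_drop] at h3
    rw [getD_drop', getD_drop'] at e1 e2 e3
    refine ⟨c + k, by omega, by omega, by omega, ?_, ?_, ?_⟩
    · rw [show c + k + 1 = c + (k + 1) by omega]; exact e1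
    · rw [show c + k + 1 = c + (k + 1) by omega, show c + k + 2 = c + (k + 2) by omega]; exact e2
    · rw [show c + k + 2 = c + (k + 2) by omega, show c + k + 3 = c + (k + 3) by omega]; exact e3

-- peel the leading run off the window sum
theorem SN_run (l : List Int) (x : Int) (c : Nat)
    (hpre : ∀ j, j < c → l.getD j 0 = x)
    (hbr : c < l.length → l.getD c 0 ≠ x)
    (hcl : c ≤ l.length) :
    SN l = (if 4 ≤ c then (c : Int) * x else 0) + SN (l.drop c) := by
  unfold SN
  rw [show List.range l.length = List.range (c + (l.length - c)) by rw [Nat.add_sub_cancel' hcl],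
      List.range_add, List.map_append, List.sum_append, List.map_map]
  congr 1
  · have hterm : ∀ i ∈ List.range c,
        (if okSpec l i then l.getD i 0 else 0) = (if 4 ≤ c then x else 0) := by
      intro i hi
      rw [List.mem_range] at hi
      by_cases h4 : 4 ≤ c
      · have hok : okSpec l i = true :=
          (okSpec_iff l i).mpr ((OkP_of_run l x c hpre hbr hcl i hi).mpr h4)
        rw [hok, if_pos rfl, if_pos h4]
        exact hpre i hi
      · have hok : ¬ okSpec l i = true := fun h =>
          h4 ((OkP_of_run l x c hpre hbr hcl i hi).mp ((okSpec_iff l i).mp h))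
        rw [if_neg hok, if_neg h4]
    rw [List.map_congr_left hterm, List.map_const', List.sum_replicate, List.length_range,
        nsmul_eq_mul]
    split_ifs <;> ring
  · have hterm : ∀ j : Nat,
        ((fun i => if okSpec l i then l.getD i 0 else 0) ∘ fun j => c + j) j
          = (if okSpec (l.drop c) j then (l.drop c).getD j 0 else 0) := by
      intro j
      show (if okSpec l (c + j) then l.getD (c + j) 0 else 0) = _
      rw [← getD_drop']
      by_cases h : OkP l (c + j)
      · rw [if_pos ((okSpec_iff l (c + j)).mpr h),
            if_pos ((okSpec_iff (l.drop c) j).mpr ((OkP_shift l x c hpre hbr j).mp h))]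
      · rw [if_neg (fun hh => h ((okSpec_iff l (c + j)).mp hh)),
            if_neg (fun hh => h ((OkP_shift l x c hpre hbr j).mpr ((okSpec_iff (l.drop c) j).mp hh)))]
    rw [List.map_congr_left (fun j _ => hterm j), List.length_drop]

theorem leadCount_prefix (v : Int) (xs : List Int) :
    ∀ j, j < leadCount v xs → xs.getD j 0 = v := by
  induction xs with
  | nil => intro j hj; simp [leadCount] at hj
  | cons x xs ih =>
    intro j hj
    unfold leadCount at hj
    by_cases hx : x = v
    · rw [if_pos hx] at hj
      cases j with
      | zero => exact hx
      | succ j => exact ih j (by omega)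
    · rw [if_neg hx] at hj; omega

theorem leadCount_break (v : Int) (xs : List Int)
    (h : leadCount v xs < xs.length) : xs.getD (leadCount v xs) 0 ≠ v := by
  induction xs with
  | nil => simp at h
  | cons x xs ih =>
    unfold leadCount at h ⊢
    by_cases hx : x = v
    · rw [if_pos hx] at h ⊢
      exact ih (by simpa using h)
    · rw [if_neg hx]
      exact hx

theorem SN_eq_g0 : ∀ (n : Nat) (l : List Int), l.length ≤ n → SN l = g0 l := by
  intro n
  induction n with
  | zero =>
    intro l hl
    have : l = [] := List.length_eq_zero_iff.mp (by omega)
    subst this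
    rfl
  | succ n ih =>
    intro l hl
    cases l with
    | nil => rfl
    | cons x xs =>
      have hlc := leadCount_le x xs
      have hpre : ∀ j, j < leadCount x xs + 1 → (x :: xs).getD j 0 = x := by
        intro j hj
        cases j with
        | zero => rfl
        | succ j => exact leadCount_prefix x xs j (by omega)
      have hbr : leadCount x xs + 1 < (x :: xs).length →
          (x :: xs).getD (leadCount x xs + 1) 0 ≠ x := by
        intro h
        simp only [List.length_cons] at h
        exact leadCount_break x xs (by omega)
      rw [SN_run (x :: xs) x (leadCount x xs + 1) hpre hbr (by simp; omega)]
      rw [ih ((x :: xs).drop (leadCount x xs + 1)) (by rw [List.length_drop]; simp only [List.length_cons] at hl ⊢; omega)]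
      rw [show (x :: xs).drop (leadCount x xs + 1) = xs.drop (leadCount x xs) from
        List.drop_succ_cons]
      show _ = gA xs x 1 0
      rw [gA_runs xs x 1 0]
      congr 1
      split_ifs with h1 h2 h2 <;> first | (exfalso; omega) | (push_cast; ring) | rfl

theorem explode_cells_alt_eq_g0 (l : List Int) : explode_cells_alt l = g0 l := by
  rw [explode_cells_alt_eq_SN, SN_eq_g0 l.length l (le_refl _)]

-- ===== VERDICT (by name: the statement is the Claim_ definition above) =====
theorem explode_cells_spec : Claim_equal_explode_cells := by
  intro l _
  unfold Spec_explode_cells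
  rw [explode_cells_eq_g0, explode_cells_alt_eq_g0]
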